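-- pv_equiv track=rewrite | github.com/JackFlying/DNFNet_release | mmdet/core/utils/utils.py | transfer_outlier_label
-- ===== SOURCE A (Python) =====
-- import collections
--
-- def transfer_outlier_label(labels):
--     """
--         将outlier的标签转换为-1
--     """
--     # import ipdb;    ipdb.set_trace()
--     counts = collections.defaultdict(int)
--     for lb in labels:
--         counts[lb] += 1
--     for i in range(len(labels)):
--         if counts[labels[i]] == 1:
--             labels[i] = -1
--     return labels
-- ===== SOURCE B (Python) =====
-- def transfer_outlier_label(labels):
--     """
--         将outlier的标签转换为-1
--     """
--     s = sorted(labels)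
--     dups = {a for a, b in zip(s, s[1:]) if a == b}
--     for i in range(len(labels)):
--         if labels[i] not in dups:
--             labels[i] = -1
--     return labels
-- ===== Notes on version B (the rewrite author's own statement) =====
-- stated objective: alternative
-- what changed: B replaces the occurrence-counting dict with a sort-then-adjacent-scan: it sorts a copy of the list, collects the values with an equal neighbour (the non-unique values) as a set, and marks every label not in that set, instead of counting occurrences per value.
import Mathlib
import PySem

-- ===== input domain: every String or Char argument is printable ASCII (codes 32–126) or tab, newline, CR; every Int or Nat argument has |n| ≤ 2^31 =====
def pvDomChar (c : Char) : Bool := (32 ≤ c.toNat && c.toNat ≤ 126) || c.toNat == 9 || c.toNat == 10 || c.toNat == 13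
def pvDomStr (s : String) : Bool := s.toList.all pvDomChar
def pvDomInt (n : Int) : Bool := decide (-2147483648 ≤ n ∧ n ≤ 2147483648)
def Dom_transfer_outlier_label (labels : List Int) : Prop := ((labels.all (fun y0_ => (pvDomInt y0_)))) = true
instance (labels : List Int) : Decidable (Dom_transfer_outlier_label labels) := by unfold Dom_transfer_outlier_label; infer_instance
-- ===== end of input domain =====

-- B replaces A's occurrence-counting dict by a sort-then-adjacent-scan: sort a copy, collect the
-- values that have an equal sorted neighbour (the non-unique values) into a set, and mark every
-- label not in that set (objective: alternative algorithm, O(n log n) instead of O(n)).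
-- Both A and B mutate the argument list in place in Python; the equivalence proved here is about the return value.

-- ===== PORT A =====
def transfer_outlier_label (labels : List Int) : List Int :=
  -- counts = defaultdict(int); for lb in labels: counts[lb] += 1
  let counts : PySem.Dict Int Int :=
    labels.foldl (fun d lb => d.modify lb 0 (· + 1)) PySem.Dict.empty
  -- for i in range(len(labels)): if counts[labels[i]] == 1: labels[i] = -1
  (PySem.List.pyRange 0 (labels.length : Int) 1).foldl
    (fun ls i =>
      if counts.getD (PySem.List.pyGetD ls i 0) 0 == 1 then PySem.List.pySetD ls i (-1) else ls)
    labels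

-- ===== PORT B =====
def transfer_outlier_label_alt (labels : List Int) : List Int :=
  -- s = sorted(labels)
  let s := PySem.List.sorted labels (fun x => x) false
  -- dups = {a for a, b in zip(s, s[1:]) if a == b}
  let dups := PySem.Set.ofList
    ((s.zip (PySem.List.slice s (some 1) none)).filterMap
      (fun ab => if ab.1 = ab.2 then some ab.1 else none))
  -- for i in range(len(labels)): if labels[i] not in dups: labels[i] = -1
  (PySem.List.pyRange 0 (labels.length : Int) 1).foldl
    (fun ls i =>
      if !(PySem.Set.contains dups (PySem.List.pyGetD ls i 0)) then PySem.List.pySetD ls i (-1)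
      else ls)
    labels

-- ===== PRECONDITION & SPEC =====
def Spec_transfer_outlier_label (labels : List Int) (out : List Int) : Prop := out = transfer_outlier_label_alt labels
instance (labels : List Int) (out : List Int) : Decidable (Spec_transfer_outlier_label labels out) := by unfold Spec_transfer_outlier_label; infer_instance

-- ===== CLAIM (what is proved, stated in full; the proofs are below) =====
def Claim_equal_transfer_outlier_label : Prop := ∀ (labels : List Int), Dom_transfer_outlier_label labels → Spec_transfer_outlier_label labels (transfer_outlier_label labels)

-- ===== LEMMAS AND PROOFS =====

-- The index loop shared by both ports, started on a list whose first k entries are already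
-- rewritten, finishes the rewrite: it returns orig mapped through (if p x then -1 else x).
lemma pv_set_loop (p : Int → Bool) (orig : List Int) :
    ∀ (m k : Nat), k + m = orig.length →
    (PySem.List.pyRange (k : Int) (orig.length : Int) 1).foldl
      (fun ls i =>
        if p (PySem.List.pyGetD ls i 0) then PySem.List.pySetD ls i (-1) else ls)
      ((orig.map (fun x => if p x then -1 else x)).take k ++ orig.drop k)
    = orig.map (fun x => if p x then -1 else x) := by
  intro m
  induction m with
  | zero =>
    intro k hk
    have hk' : k = orig.length := by omega
    subst hk'
    rw [PySem.List.pyRange_one_eq_nil (le_refl _)]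
    simp
  | succ m ih =>
    intro k hk
    have hklt : k < orig.length := by omega
    have hkI : (k : Int) < (orig.length : Int) := by exact_mod_cast hklt
    rw [PySem.List.pyRange_one_cons hkI]
    set f : Int → Int := fun x => if p x then -1 else x with hf
    have hTlen : ((orig.map f).take k).length = k := by
      simp [Nat.le_of_lt hklt]
    have hinitlen : ((orig.map f).take k ++ orig.drop k).length = orig.length := by
      simp; omega
    have hget : PySem.List.pyGetD ((orig.map f).take k ++ orig.drop k) (k : Int) 0
        = orig[k] := by
      rw [PySem.List.pyGetD_natCast]
      have hklt' : k < ((orig.map f).take k ++ orig.drop k).length := by omega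
      rw [List.getD_eq_getElem _ _ hklt']
      rw [List.getElem_append_right (by omega)]
      simp [hTlen]
    have hstep :
        (if p (PySem.List.pyGetD ((orig.map f).take k ++ orig.drop k) (k : Int) 0)
          then PySem.List.pySetD ((orig.map f).take k ++ orig.drop k) (k : Int) (-1)
          else (orig.map f).take k ++ orig.drop k)
        = (orig.map f).take (k + 1) ++ orig.drop (k + 1) := by
      rw [hget]
      have hdrop : orig.drop k = orig[k] :: orig.drop (k + 1) :=
        List.drop_eq_getElem_cons hklt
      have htake : (orig.map f).take (k + 1)
          = (orig.map f).take k ++ [f orig[k]] := by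
        rw [List.take_add_one]
        simp [hklt]
      by_cases hp : p orig[k]
      · simp only [hp, if_pos]
        have hklt' : k < ((orig.map f).take k ++ orig.drop k).length := by omega
        have hset : PySem.List.pySetD ((orig.map f).take k ++ orig.drop k) (k : Int) (-1)
            = ((orig.map f).take k ++ orig.drop k).set k (-1) := by
          simp only [PySem.List.pySetD, PySem.List.pySet?, PySem.List.pyIdx?,
            Nat.cast_nonneg, reduceIte, Nat.cast_lt, hklt', Int.toNat_natCast,
            Option.map_some, Option.getD_some]
        rw [hset, htake, List.set_append_right _ _ hTlen.le]
        rw [hTlen, Nat.sub_self]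
        simp only [hdrop, List.set_cons_zero]
        simp [hf, hp]
      · simp only [hp, if_neg, Bool.false_eq_true, not_false_iff]
        rw [htake, hdrop]
        simp [hf, hp]
    rw [List.foldl_cons, hstep]
    have := ih (k + 1) (by omega)
    exact_mod_cast this

-- In a (≤-)sorted list, a value has an equal adjacent neighbour iff it occurs at least twice.
lemma pv_adj_dup (s : List Int) (hs : s.Pairwise (· ≤ ·)) (x : Int) :
    x ∈ (s.zip s.tail).filterMap (fun ab => if ab.1 = ab.2 then some ab.1 else none)
      ↔ 2 ≤ List.count x s := by
  induction s with
  | nil => simp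
  | cons a t ih =>
    cases t with
    | nil =>
      simp only [List.tail_cons, List.zip_nil_right, List.filterMap_nil, List.not_mem_nil,
        false_iff, not_le, List.count_cons, List.count_nil]
      split <;> omega

    | cons b t' =>
      have hab : a ≤ b := (List.pairwise_cons.mp hs).1 b (by simp)
      have hbmin : ∀ y ∈ t', b ≤ y := (List.pairwise_cons.mp (List.pairwise_cons.mp hs).2).1
      have iht := ih (List.pairwise_cons.mp hs).2
      simp only [List.tail_cons, List.zip_cons_cons, List.filterMap_cons] at *
      by_cases hax : a = x
      · by_cases hbx : b = x
        · have hab' : a = b := by rw [hax, hbx]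
          subst hax
          subst hab'
          simp
        · -- a = x but b ≠ x: x cannot recur (b is the tail minimum), both sides false
          have hxt' : x ∉ t' := by
            intro h
            have hbx' : b ≤ x := hbmin x h
            have : x ≤ b := hax ▸ hab
            exact hbx (le_antisymm hbx' this)
          have hc' : List.count x t' = 0 := List.count_eq_zero.mpr hxt'
          have hanb : a ≠ b := fun h => hbx (h ▸ hax)
          have hxb : ¬ x = b := fun h => hbx h.symm
          simp only [if_neg (hanb), iht, List.count_cons, hc', beq_iff_eq]
          rw [if_neg hbx, if_pos hax]
          omega
      · have hxa : ¬ x = a := fun h => hax h.symm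
        by_cases hab' : a = b
        · have hxb : ¬ x = b := hab' ▸ hxa
          have hbx : ¬ b = x := fun h => hxb h.symm
          simp [hab', hxb, hbx, iht]
        · simp [hab', hax, hxa, iht]

-- ===== VERDICT (by name: the statement is the Claim_ definition above) =====
theorem transfer_outlier_label_spec : Claim_equal_transfer_outlier_label := by
  intro labels _
  unfold Spec_transfer_outlier_label transfer_outlier_label transfer_outlier_label_alt
  -- A's counts dict is the multiset of counts
  have hcnt : ∀ v : Int,
      (labels.foldl (fun d lb => d.modify lb 0 (· + 1))
        (PySem.Dict.empty : PySem.Dict Int Int)).getD v 0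
      = (List.count v labels : Int) := by
    intro v
    rw [PySem.Dict.getD_foldl_modify_add_one]
    simp
  set s := PySem.List.sorted labels (fun x => x) false with hsdef
  have hsp : s.Pairwise (· ≤ ·) := by
    have := PySem.List.sorted_pairwise labels (fun x => x)
    simpa [hsdef] using this
  have hperm : s.Perm labels := PySem.List.sorted_perm labels (fun x => x) false
  have hslice : PySem.List.slice s (some 1) none = s.tail := PySem.List.slice_from_one s
  have hA := pv_set_loop
    (fun v =>
      (labels.foldl (fun d lb => d.modify lb 0 (· + 1))
        (PySem.Dict.empty : PySem.Dict Int Int)).getD v 0 == 1)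
    labels labels.length 0 (by omega)
  have hB := pv_set_loop
    (fun v => !(PySem.Set.contains
      (PySem.Set.ofList ((s.zip (PySem.List.slice s (some 1) none)).filterMap
        (fun ab => if ab.1 = ab.2 then some ab.1 else none))) v))
    labels labels.length 0 (by omega)
  simp only [List.take_zero, List.drop_zero, List.nil_append, Nat.cast_zero] at hA hB
  rw [hA, hB]
  apply List.map_congr_left
  intro x hx
  -- both conditions say: x occurs exactly once in labels
  have hmem : (PySem.Set.contains
      (PySem.Set.ofList ((s.zip (PySem.List.slice s (some 1) none)).filterMap
        (fun ab => if ab.1 = ab.2 then some ab.1 else none))) x) = true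
      ↔ 2 ≤ List.count x labels := by
    rw [PySem.Set.contains_iff, PySem.Set.mem_ofList, hslice, pv_adj_dup s hsp x,
      hperm.count_eq]
  have hx1 : 1 ≤ List.count x labels := List.one_le_count_iff.mpr hx
  by_cases h2 : 2 ≤ List.count x labels
  · have hc := hmem.mpr h2
    have hne : List.count x labels ≠ 1 := by omega
    simp only [hc, hcnt, beq_iff_eq, Nat.cast_eq_one, Bool.not_true]
    simp [hne]
  · have hc : _ = false := (Bool.not_eq_true _).mp (fun h => h2 (hmem.mp h))
    have heq : List.count x labels = 1 := by omega
    simp only [hc, hcnt, beq_iff_eq, Nat.cast_eq_one, Bool.not_false]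
    simp [heq]
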